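-- pv_equiv track=rewrite | github.com/Chohongjae/chohongjae.github.io | docs/Algorithm/원스토어/test3.py | solution
-- ===== SOURCE A (Python) =====
-- def solution(n):
--     d = [0] * 30
--     l = 0
--     while (n > 0):
--         d[l] = n % 2
--         n //= 2
--         l += 1
--     for p in range(1, (l // 2) + 1):
--         ok = True
--         for i in range(l - p):
--             if d[l - i - 1] != d[l - i - 1 - p]:
--                 ok = False
--                 break
--         if ok:
--             return p
--     return -1
-- ===== SOURCE B (Python) =====
-- def solution(n):
--     # KMP: the smallest period of a string s of length l is l - pi[-1],
--     # where pi is the prefix (failure) function; the bit pattern of n is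
--     # periodic with period p (repeated at least twice) iff that smallest
--     # period is at most l // 2.
--     if n <= 0:
--         return -1
--     s = bin(n)[2:]
--     l = len(s)
--     pi = [0] * l
--     k = 0
--     for i in range(1, l):
--         while k and s[i] != s[k]:
--             k = pi[k - 1]
--         if s[i] == s[k]:
--             k += 1
--         pi[i] = k
--     p = l - pi[-1]
--     return p if p <= l // 2 else -1
-- ===== Notes on version B (the rewrite author's own statement) =====
-- stated objective: alternative
-- what changed: B removes A's scan over candidate periods with an inner bit-comparison loop: it builds the MSB-first binary string, computes the KMP prefix (failure) function in one pass, reads the smallest period as l - pi[-1], and gates it by p <= l//2.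
-- outside the precondition, e.g. on solution(1073741824): A raises IndexError, B returns -1
import Mathlib
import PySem

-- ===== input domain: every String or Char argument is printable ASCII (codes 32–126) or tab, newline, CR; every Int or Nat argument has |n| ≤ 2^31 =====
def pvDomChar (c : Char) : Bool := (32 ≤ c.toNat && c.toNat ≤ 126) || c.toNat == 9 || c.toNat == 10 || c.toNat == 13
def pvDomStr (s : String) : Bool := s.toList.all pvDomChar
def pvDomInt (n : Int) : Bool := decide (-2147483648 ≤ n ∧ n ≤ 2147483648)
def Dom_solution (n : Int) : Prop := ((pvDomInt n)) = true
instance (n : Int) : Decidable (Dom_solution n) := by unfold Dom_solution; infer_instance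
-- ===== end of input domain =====

-- B replaces A's scan over candidate periods (with an inner bit-comparison
-- loop) by a single KMP prefix-function pass over the binary string: the
-- smallest period is l - pi[-1] (objective: alternative).

-- ===== PORT A =====
-- inner 'for i in range(l - p)' loop with the ok/break flag: its net effect is
-- an all-check; the list reads are in range at every call site of solChk
def solChk (d : List Int) (l p : Nat) : Bool :=
  (List.range (l - p)).all (fun i => d.getD (l - i - 1) 0 == d.getD (l - i - 1 - p) 0)

-- 'while n > 0: d[l] = n % 2; n //= 2; l += 1'; none = IndexError when l ≥ len(d)
def solLoop (n : Int) (d : List Int) (l : Nat) : Option (List Int × Nat) :=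
  if h : 0 < n then
    if l < d.length then
      solLoop (PySem.Int.floordiv n 2) (d.set l (PySem.Int.mod n 2)) (l + 1)
    else none
  else some (d, l)
termination_by n.toNat
decreasing_by
  rw [PySem.Int.floordiv_eq_ediv_of_pos (by norm_num : (0:Int) < 2)]; omega

def solution (n : Int) : Int :=
  match solLoop n (List.replicate 30 0) 0 with
  | none => 0   -- Python raises IndexError here; excluded by Pre_solution
  | some (d, l) =>
    -- 'for p in range(1, l // 2 + 1): … if ok: return p' then 'return -1'
    match (List.range' 1 (l / 2)).find? (fun p => solChk d l p) with
    | some p => (p : Int)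
    | none => -1

-- ===== PORT B =====
-- bin(n)[2:] for n > 0: the MSB-first '0'/'1' characters of n
def binChars (m : Nat) : List Char :=
  if h : m = 0 then [] else binChars (m / 2) ++ [if m % 2 = 1 then '1' else '0']
termination_by m
decreasing_by exact Nat.div_lt_self (Nat.pos_of_ne_zero h) (by norm_num)

-- 'while k and s[i] != s[k]: k = pi[k - 1]'.  The 'k' < k' guard only serves
-- termination: the failure table always satisfies pi[j] ≤ j, so on every state
-- the Python loop reaches the guard is true and the port follows the Python.
def kmpWhile (s : List Char) (pi : List Nat) (i k : Nat) : Nat :=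
  if k ≠ 0 ∧ s.getD i ' ' ≠ s.getD k ' ' then
    let k' := pi.getD (k - 1) 0
    if _h : k' < k then kmpWhile s pi i k' else k'
  else k
termination_by k

-- one iteration of 'for i in range(1, l)' on the state (pi, k)
def kmpStep (s : List Char) (st : List Nat × Nat) (i : Nat) : List Nat × Nat :=
  let k1 := kmpWhile s st.1 i st.2
  let k2 := if s.getD i ' ' = s.getD k1 ' ' then k1 + 1 else k1
  (st.1.set i k2, k2)

def solution_alt (n : Int) : Int :=
  if n ≤ 0 then -1
  else
    let s := binChars n.toNat
    let l := s.length
    let pi := ((List.range' 1 (l - 1)).foldl (kmpStep s) (List.replicate l 0, 0)).1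
    let p := l - pi.getD (l - 1) 0   -- pi[-1]; l ≥ 1 since n > 0
    if p ≤ l / 2 then (p : Int) else -1

-- ===== PRECONDITION & SPEC =====
-- Pre_ excludes n ≥ 2^30 only: there A's fixed 30-slot array overflows and A
-- raises IndexError (B still returns the period answer there); A returns on
-- every other input and all of those are admitted.
def Pre_solution (n : Int) : Prop := n < 1073741824
instance (n : Int) : Decidable (Pre_solution n) := by unfold Pre_solution; infer_instance
def pvWitness_solution : Int := 10

def Spec_solution (n : Int) (out : Int) : Prop := out = solution_alt n
instance (n : Int) (out : Int) : Decidable (Spec_solution n out) := by unfold Spec_solution; infer_instance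

-- ===== CLAIM (what is proved, stated in full; the proofs are below) =====
def Claim_equal_solution : Prop := ∀ (n : Int), Dom_solution n → Pre_solution n → Spec_solution n (solution n)

-- ===== LEMMAS AND PROOFS =====

-- ---- A-side: the filling loop and the periodicity check ----

theorem bitLength_pos (n : Int) (h : 0 < n) : 0 < PySem.Int.bitLength n := by
  rcases Nat.eq_zero_or_pos (PySem.Int.bitLength n) with h0 | h1
  · have := PySem.Int.lt_two_pow_bitLength n
    rw [h0] at this; simp at this; omega
  · exact h1

theorem getD_replicate_zero' (k j : Nat) : (List.replicate k (0:Int)).getD j 0 = 0 := by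
  induction k generalizing j with
  | zero => rfl
  | succ k ih =>
    cases j with
    | zero => simp [List.replicate_succ]
    | succ j => simp [List.replicate_succ, ih j]

-- the while loop writes the bits of n above index l and returns l + bit_length n
theorem solLoop_spec (n : Int) (d : List Int) (l : Nat) (hn : 0 ≤ n)
    (hlen : l + PySem.Int.bitLength n ≤ d.length)
    (hzero : ∀ j, l ≤ j → d.getD j 0 = 0) :
    ∃ d', solLoop n d l = some (d', l + PySem.Int.bitLength n) ∧
      (∀ j, l ≤ j → d'.getD j 0 = if n.toNat.testBit (j - l) then 1 else 0) ∧
      (∀ j, j < l → d'.getD j 0 = d.getD j 0) := by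
  revert hn hlen hzero
  induction n, d, l using solLoop.induct with
  | case1 n d l hpos hlt ih =>
    intro hn hlen hzero
    have hbl : PySem.Int.bitLength n = PySem.Int.bitLength (PySem.Int.floordiv n 2) + 1 :=
      PySem.Int.bitLength_of_pos hpos
    have hn2 : 0 ≤ PySem.Int.floordiv n 2 := by
      rw [PySem.Int.floordiv_eq_ediv_of_pos (by norm_num : (0:Int) < 2)]; omega
    have hlen2 : (l + 1) + PySem.Int.bitLength (PySem.Int.floordiv n 2) ≤
        (d.set l (PySem.Int.mod n 2)).length := by
      simp only [List.length_set]; omega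
    have hzero2 : ∀ j, l + 1 ≤ j → (d.set l (PySem.Int.mod n 2)).getD j 0 = 0 := by
      intro j hj
      rw [show (d.set l (PySem.Int.mod n 2)).getD j 0 = d.getD j 0 by
        simp [List.getD, List.getElem?_set_ne (by omega : l ≠ j)]]
      exact hzero j (by omega)
    obtain ⟨d', hrun, hhi, hlo⟩ := ih hn2 hlen2 hzero2
    refine ⟨d', ?_, ?_, ?_⟩
    · rw [solLoop, dif_pos hpos, if_pos hlt, hrun, hbl]
      simp only [Option.some.injEq, Prod.mk.injEq, true_and]
      omega
    · intro j hj
      have htn : (PySem.Int.floordiv n 2).toNat = n.toNat / 2 := by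
        rw [PySem.Int.floordiv_eq_ediv_of_pos (by norm_num : (0:Int) < 2)]; omega
      rcases Nat.lt_or_ge j (l + 1) with hjl | hjl
      · have hjeq : j = l := by omega
        subst hjeq
        rw [hlo j (by omega)]
        rw [show (d.set j (PySem.Int.mod n 2)).getD j 0 = PySem.Int.mod n 2 by
          simp [List.getD, hlt]]
        have hmod : PySem.Int.mod n 2 = ((n.toNat % 2 : Nat) : Int) := by
          rw [PySem.Int.mod_eq_emod_of_pos (by norm_num : (0:Int) < 2)]; omega
        rw [hmod, Nat.sub_self]
        rcases Nat.mod_two_eq_zero_or_one n.toNat with h2 | h2 <;>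
          simp [Nat.testBit_zero, h2] <;> omega
      · have := hhi j hjl
        rw [htn] at this
        rw [this]
        have hsub : j - l = (j - (l + 1)) + 1 := by omega
        rw [hsub, Nat.testBit_add_one]
    · intro j hj
      rw [hlo j (by omega)]
      simp [List.getD, List.getElem?_set_ne (by omega : l ≠ j)]
  | case2 n d l hpos hlt =>
    intro hn hlen hzero
    exact absurd hlen (by have := bitLength_pos n hpos; omega)
  | case3 n d l hpos =>
    intro hn hlen hzero
    have hn0 : n = 0 := by omega
    subst hn0
    refine ⟨d, ?_, ?_, fun j _ => rfl⟩
    · rw [solLoop, dif_neg hpos]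
      simp [PySem.Int.bitLength_zero]
    · intro j hj
      simpa [Nat.zero_testBit] using hzero j hj

theorem beq_ite_bits (a b : Bool) :
    ((if a then (1:Int) else 0) == (if b then (1:Int) else 0)) = (a == b) := by
  cases a <;> cases b <;> decide

theorem solChk_iff (n : Int) (d' : List Int) (l p : Nat)
    (hd : ∀ j, d'.getD j 0 = if n.toNat.testBit j then 1 else 0) :
    solChk d' l p = true ↔
    ∀ i < l - p, n.toNat.testBit (l - i - 1) = n.toNat.testBit (l - i - 1 - p) := by
  unfold solChk
  simp only [List.all_eq_true, List.mem_range, hd, beq_ite_bits, beq_iff_eq]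

-- ---- the binary string bin(n)[2:] ----

theorem binChars_length (m : Nat) :
    (binChars m).length = PySem.Int.bitLength (m : Int) := by
  induction m using Nat.strong_induction_on with
  | _ m ih =>
    by_cases h : m = 0
    · subst h; rw [binChars]; simp [PySem.Int.bitLength_zero]
    · rw [binChars, dif_neg h, PySem.Int.bitLength_natCast (Nat.pos_of_ne_zero h)]
      simp [ih (m / 2) (Nat.div_lt_self (Nat.pos_of_ne_zero h) (by norm_num))]

theorem binChars_getD (m : Nat) :
    ∀ j < (binChars m).length,
      (binChars m).getD j ' ' =
        if m.testBit ((binChars m).length - 1 - j) then '1' else '0' := by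
  induction m using Nat.strong_induction_on with
  | _ m ih =>
    by_cases h : m = 0
    · subst h; intro j hj; rw [binChars] at hj; simp at hj
    · intro j hj
      rw [binChars, dif_neg h] at hj ⊢
      rw [List.length_append, List.length_singleton] at hj ⊢
      rcases Nat.lt_or_ge j (binChars (m / 2)).length with hjl | hjr
      · rw [List.getD_eq_getElem?_getD, List.getElem?_append_left hjl,
            ← List.getD_eq_getElem?_getD]
        rw [ih (m / 2) (Nat.div_lt_self (Nat.pos_of_ne_zero h) (by norm_num)) j hjl]
        have e : (binChars (m / 2)).length + 1 - 1 - j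
            = ((binChars (m / 2)).length - 1 - j) + 1 := by omega
        rw [e, Nat.testBit_add_one]
      · have hje : j = (binChars (m / 2)).length := by omega
        subst hje
        rw [List.getD_eq_getElem?_getD, List.getElem?_append_right hjr]
        simp only [Nat.sub_self, List.getElem?_cons_zero, Option.getD_some]
        rw [Nat.add_sub_cancel, Nat.sub_self, Nat.testBit_zero]
        rcases Nat.mod_two_eq_zero_or_one m with h2 | h2 <;> simp [h2]

-- ---- borders (KMP correctness layer) ----

-- 'k is a proper border of the prefix of s of length i'
def brdB (s : List Char) (i k : Nat) : Bool :=
  decide (k < i) && (List.range k).all (fun j => s.getD j ' ' == s.getD (i - k + j) ' ')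

def Brd (s : List Char) (i k : Nat) : Prop := brdB s i k = true

theorem brd_iff (s : List Char) (i k : Nat) :
    Brd s i k ↔ k < i ∧ ∀ j < k, s.getD j ' ' = s.getD (i - k + j) ' ' := by
  simp [Brd, brdB, List.all_eq_true, List.mem_range]

-- the longest proper border of the prefix of length i
def maxBrd (s : List Char) (i : Nat) : Nat :=
  Nat.findGreatest (fun k => brdB s i k = true) i

theorem brd_zero (s : List Char) (i : Nat) (hi : 0 < i) : Brd s i 0 := by
  rw [brd_iff]; exact ⟨hi, fun j hj => absurd hj (by omega)⟩

theorem brd_lt (s : List Char) (i k : Nat) (h : Brd s i k) : k < i :=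
  ((brd_iff s i k).1 h).1

theorem maxBrd_spec (s : List Char) (i : Nat) (hi : 0 < i) : Brd s i (maxBrd s i) :=
  Nat.findGreatest_spec (Nat.zero_le i) (brd_zero s i hi)

theorem maxBrd_lt (s : List Char) (i : Nat) (hi : 0 < i) : maxBrd s i < i :=
  brd_lt s i _ (maxBrd_spec s i hi)

theorem le_maxBrd (s : List Char) (i k : Nat) (h : Brd s i k) : k ≤ maxBrd s i :=
  Nat.le_findGreatest (Nat.le_of_lt (brd_lt s i k h)) h

-- a border of a border (prefix) is a border of the whole prefix
theorem brd_trans (s : List Char) (i k c : Nat) (h1 : Brd s i k) (h2 : Brd s k c) :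
    Brd s i c := by
  rw [brd_iff] at h1 h2 ⊢
  obtain ⟨hk, hik⟩ := h1
  obtain ⟨hc, hkc⟩ := h2
  refine ⟨by omega, fun j hj => ?_⟩
  have e1 := hkc j hj
  have e2 := hik (k - c + j) (by omega)
  have e : i - k + (k - c + j) = i - c + j := by omega
  rw [e] at e2
  rw [e1, ← e2]

-- a shorter border of a prefix is a border of any longer border of it
theorem brd_nest (s : List Char) (i k c : Nat) (h1 : Brd s i k) (h2 : Brd s i c)
    (hck : c < k) : Brd s k c := by
  rw [brd_iff] at h1 h2 ⊢
  obtain ⟨hk, hik⟩ := h1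
  obtain ⟨hc, hic⟩ := h2
  refine ⟨hck, fun j hj => ?_⟩
  have e1 := hic j hj
  have e2 := hik (k - c + j) (by omega)
  have e : i - k + (k - c + j) = i - c + j := by omega
  rw [e] at e2
  rw [e1, e2]

-- extending a border by one matching character
theorem brd_succ (s : List Char) (i c : Nat) :
    Brd s (i + 1) (c + 1) ↔ Brd s i c ∧ s.getD c ' ' = s.getD i ' ' := by
  rw [brd_iff, brd_iff]
  constructor
  · rintro ⟨hlt, hall⟩
    refine ⟨⟨by omega, fun j hj => ?_⟩, ?_⟩
    · have := hall j (by omega)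
      rwa [show i + 1 - (c + 1) + j = i - c + j by omega] at this
    · have := hall c (by omega)
      rwa [show i + 1 - (c + 1) + c = i by omega] at this
  · rintro ⟨⟨hlt, hall⟩, hc⟩
    refine ⟨by omega, fun j hj => ?_⟩
    rw [show i + 1 - (c + 1) + j = i - c + j by omega]
    rcases Nat.lt_or_ge j c with hjc | hjc
    · exact hall j hjc
    · have hje : j = c := by omega
      subst hje
      rwa [show i - j + j = i by omega]

-- the while loop of KMP: starting from a border k of prefix i that bounds every
-- border whose next character matches s[i], it computes maxBrd (i+1) (after the
-- final +1 adjustment)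
theorem kmpWhile_spec (s : List Char) (pi : List Nat) (i : Nat) (hi : 1 ≤ i)
    (hpi : ∀ j, j < i → pi.getD j 0 = maxBrd s (j + 1)) :
    ∀ k, Brd s i k →
      (∀ c, Brd s i c → s.getD c ' ' = s.getD i ' ' → c ≤ k) →
      (if s.getD i ' ' = s.getD (kmpWhile s pi i k) ' '
        then kmpWhile s pi i k + 1 else kmpWhile s pi i k) = maxBrd s (i + 1) := by
  intro k
  induction k using Nat.strong_induction_on with
  | _ k ihk =>
    intro hbk hub
    by_cases hc : k ≠ 0 ∧ s.getD i ' ' ≠ s.getD k ' '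
    · -- loop body: k := pi[k-1] = maxBrd s k
      obtain ⟨hk0, hne⟩ := hc
      have hklt : k < i := brd_lt s i k hbk
      have hpik : pi.getD (k - 1) 0 = maxBrd s k := by
        have := hpi (k - 1) (by omega)
        rwa [show k - 1 + 1 = k by omega] at this
      have hmlt : maxBrd s k < k := maxBrd_lt s k (by omega)
      have hstep : kmpWhile s pi i k = kmpWhile s pi i (maxBrd s k) := by
        rw [kmpWhile, if_pos (⟨hk0, hne⟩ : k ≠ 0 ∧ s.getD i ' ' ≠ s.getD k ' ')]
        simp only [hpik, dif_pos hmlt]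
      rw [hstep]
      apply ihk (maxBrd s k) hmlt
      · -- maxBrd s k is a border of prefix i
        rcases Nat.eq_zero_or_pos (maxBrd s k) with hz | hpos
        · rw [hz]; exact brd_zero s i (by omega)
        · exact brd_trans s i k _ hbk (maxBrd_spec s k (by omega))
      · -- it bounds every matching border
        intro c hbc hcm
        have hck : c ≤ k := hub c hbc hcm
        have hcne : c ≠ k := by
          intro he; subst he; exact hne hcm.symm
        rcases Nat.eq_zero_or_pos c with hz | hpos
        · omega
        · exact le_maxBrd s k c (brd_nest s i k c hbk hbc (by omega))
    · -- loop exit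
      have hstep : kmpWhile s pi i k = k := by
        rw [kmpWhile, if_neg hc]
      rw [hstep]
      push_neg at hc
      by_cases hm : s.getD i ' ' = s.getD k ' '
      · -- match: result is k + 1 = maxBrd (i+1)
        rw [if_pos hm]
        have hbk1 : Brd s (i + 1) (k + 1) := (brd_succ s i k).2 ⟨hbk, hm.symm⟩
        refine Nat.le_antisymm (le_maxBrd s (i + 1) (k + 1) hbk1) ?_
        have hpos : 0 < maxBrd s (i + 1) :=
          Nat.lt_of_lt_of_le (Nat.succ_pos k) (le_maxBrd s (i + 1) (k + 1) hbk1)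
        obtain ⟨c, hce⟩ : ∃ c, maxBrd s (i + 1) = c + 1 :=
          ⟨maxBrd s (i + 1) - 1, by omega⟩
        rw [hce]
        have hbc := maxBrd_spec s (i + 1) (by omega)
        rw [hce] at hbc
        obtain ⟨hbc', hmc⟩ := (brd_succ s i c).1 hbc
        exact Nat.succ_le_succ (hub c hbc' hmc)
      · -- no match: k = 0 and maxBrd (i+1) = 0
        have hk0 : k = 0 := by
          by_contra hk0
          exact hm (hc hk0)
        rw [if_neg hm, hk0]
        by_contra hne0
        have hpos : 0 < maxBrd s (i + 1) := by omega
        obtain ⟨c, hce⟩ : ∃ c, maxBrd s (i + 1) = c + 1 :=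
          ⟨maxBrd s (i + 1) - 1, by omega⟩
        have hbc := maxBrd_spec s (i + 1) (by omega)
        rw [hce] at hbc
        obtain ⟨hbc', hmc⟩ := (brd_succ s i c).1 hbc
        have := hub c hbc' hmc
        rw [hk0] at this
        have hcz : c = 0 := by omega
        subst hcz
        subst hk0
        exact hm hmc.symm

-- the fold over range(1, l) maintains: pi is correct below i and k = maxBrd i
theorem kmpFold (s : List Char) (hl : 1 ≤ s.length) (m : Nat) (hm : m + 1 ≤ s.length) :
    ((List.range' 1 m).foldl (kmpStep s) (List.replicate s.length 0, 0)).1.length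
        = s.length ∧
    (∀ j, j ≤ m →
      ((List.range' 1 m).foldl (kmpStep s) (List.replicate s.length 0, 0)).1.getD j 0
        = maxBrd s (j + 1)) ∧
    ((List.range' 1 m).foldl (kmpStep s) (List.replicate s.length 0, 0)).2
        = maxBrd s (m + 1) := by
  induction m with
  | zero =>
    refine ⟨by simp, fun j hj => ?_, ?_⟩
    · have hj0 : j = 0 := by omega
      subst hj0
      rw [show (List.range' 1 0) = ([] : List Nat) from rfl]
      simp only [List.foldl_nil]
      rw [List.getD_eq_getElem?_getD]
      rw [List.getElem?_replicate]
      rw [if_pos (by omega : 0 < s.length)]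
      simp only [Option.getD_some]
      symm
      rw [maxBrd, Nat.findGreatest_eq_zero_iff]
      intro c hc hc1 hP
      have := brd_lt s 1 c hP
      omega
    · rw [show (List.range' 1 0) = ([] : List Nat) from rfl]
      simp only [List.foldl_nil]
      symm
      rw [maxBrd, Nat.findGreatest_eq_zero_iff]
      intro c hc hc1 hP
      have := brd_lt s 1 c hP
      omega
  | succ m ihm =>
    obtain ⟨ihlen, ihpi, ihk⟩ := ihm (by omega)
    have hconc : List.range' 1 (m + 1) = List.range' 1 m ++ [m + 1] := by
      have h := List.range'_concat (s := 1) (n := m) (step := 1)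
      simpa [Nat.add_comm] using h
    rw [hconc, List.foldl_append, List.foldl_cons, List.foldl_nil]
    set st := (List.range' 1 m).foldl (kmpStep s) (List.replicate s.length 0, 0) with hst
    have hpi' : ∀ j, j < m + 1 → st.1.getD j 0 = maxBrd s (j + 1) := by
      intro j hj; exact ihpi j (by omega)
    have hk2 := kmpWhile_spec s st.1 (m + 1) (by omega) hpi' st.2
      (by rw [ihk]; exact maxBrd_spec s (m + 1) (by omega))
      (by rw [ihk]; exact fun c hc _ => le_maxBrd s (m + 1) c hc)
    unfold kmpStep
    refine ⟨by simpa using ihlen, fun j hj => ?_, ?_⟩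
    · rcases Nat.lt_or_ge j (m + 1) with hjl | hjr
      · rw [List.getD_eq_getElem?_getD,
            List.getElem?_set_ne (by omega : m + 1 ≠ j),
            ← List.getD_eq_getElem?_getD]
        exact ihpi j (by omega)
      · have hje : j = m + 1 := by omega
        subst hje
        rw [List.getD_eq_getElem?_getD,
            List.getElem?_set_self (by rw [ihlen]; omega)]
        simp only [Option.getD_some]
        exact hk2
    · exact hk2

-- ---- connecting borders of the bit string to bit-level periods ----

theorem ite_char_iff (a b : Bool) :
    ((if a then '1' else '0') = (if b then '1' else '0')) ↔ a = b := by
  cases a <;> cases b <;> simp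

-- k is a proper border of the whole bit string iff l - k is a bit-level period
theorem brd_iff_per (m p : Nat) (hm : 0 < m) (hp1 : 1 ≤ p)
    (hpL : p ≤ (binChars m).length) :
    Brd (binChars m) (binChars m).length ((binChars m).length - p) ↔
    (∀ i < (binChars m).length - p,
      m.testBit ((binChars m).length - i - 1)
        = m.testBit ((binChars m).length - i - 1 - p)) := by
  set L := (binChars m).length with hL
  rw [brd_iff]
  have hLpos : 0 < L := by omega
  constructor
  · rintro ⟨_, hall⟩ i hi
    have h2 := hall i hi
    rw [show L - (L - p) + i = p + i by omega] at h2
    rw [binChars_getD m i (by omega), binChars_getD m (p + i) (by omega)] at h2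
    rw [ite_char_iff, ← hL] at h2
    rw [show L - i - 1 = L - 1 - i by omega,
        show L - 1 - i - p = L - 1 - (p + i) by omega]
    exact h2
  · intro h
    refine ⟨by omega, fun j hj => ?_⟩
    have h2 := h j hj
    rw [show L - (L - p) + j = p + j by omega]
    rw [binChars_getD m j (by omega), binChars_getD m (p + j) (by omega),
        ite_char_iff, ← hL]
    rw [show L - j - 1 = L - 1 - j by omega,
        show L - 1 - j - p = L - 1 - (p + j) by omega] at h2
    exact h2

-- find? on an ascending range, characterised by the least p satisfying f
theorem find?_range'_aux (f : Nat → Bool) (p0 : Nat) (h0 : f p0 = true) :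
    ∀ (em a : Nat), a ≤ p0 → (∀ q, a ≤ q → q < p0 → f q = false) →
    (List.range' a em).find? f = if p0 < a + em then some p0 else none := by
  intro em
  induction em with
  | zero =>
    intro a ha hq
    rw [if_neg (by omega)]
    rfl
  | succ em ihm =>
    intro a ha hq
    rw [List.range'_succ, List.find?_cons]
    rcases Nat.eq_or_lt_of_le ha with hae | halt
    · subst hae
      rw [h0, if_pos (by omega)]
    · rw [hq a (by omega) halt]
      rw [ihm (a + 1) (by omega) (fun q h1 h2 => hq q (by omega) h2)]
      by_cases hc : p0 < a + 1 + em
      · rw [if_pos hc, if_pos (by omega)]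
      · rw [if_neg hc, if_neg (by omega)]

-- ===== VERDICT (statements are the Claim_ definitions above) =====

theorem solution_spec : Claim_equal_solution := by
  intro n _ hpre
  unfold Spec_solution
  by_cases hn : n ≤ 0
  · have h0 : solLoop n (List.replicate 30 0) 0 = some (List.replicate 30 0, 0) := by
      rw [solLoop, dif_neg (by omega : ¬ 0 < n)]
    unfold solution solution_alt
    rw [h0]
    simp [hn]
  · push_neg at hn
    have hmpos : 0 < n.toNat := by omega
    have hcast : ((n.toNat : Nat) : Int) = n := by omega
    -- the bit string and its length
    set s := binChars n.toNat with hs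
    set L := s.length with hLdef
    have hLbl : L = PySem.Int.bitLength n := by
      rw [hLdef, hs, binChars_length, hcast]
    have hLpos : 0 < L := by
      rw [hLbl]; exact bitLength_pos n hn
    -- A's filled array
    have hbl30 : PySem.Int.bitLength n ≤ 30 := by
      by_contra hgt
      push_neg at hgt
      have h1 := PySem.Int.two_pow_bitLength_le n (by omega)
      have h2 : (2:Nat) ^ 30 ≤ 2 ^ (PySem.Int.bitLength n - 1) :=
        Nat.pow_le_pow_right (by norm_num) (by omega)
      have h3 : (2:Nat) ^ 30 = 1073741824 := by norm_num
      unfold Pre_solution at hpre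
      omega
    obtain ⟨d', hrun, hhi, _⟩ := solLoop_spec n (List.replicate 30 0) 0 (by omega)
      (by simpa using hbl30) (fun j _ => getD_replicate_zero' 30 j)
    have hd : ∀ j, d'.getD j 0 = if n.toNat.testBit j then 1 else 0 := by
      intro j
      simpa using hhi j (Nat.zero_le j)
    -- the smallest period is L - maxBrd s L
    have hM := maxBrd_spec s L hLpos
    have hMlt := maxBrd_lt s L hLpos
    set M := maxBrd s L with hMdef
    set p0 := L - M with hp0def
    have hp0pos : 1 ≤ p0 := by omega
    have hp0L : p0 ≤ L := by omega
    -- p0 satisfies A's check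
    have hfp0 : solChk d' L p0 = true := by
      rw [solChk_iff n d' L p0 hd]
      rw [← brd_iff_per n.toNat p0 hmpos hp0pos hp0L]
      rw [show L - p0 = M by omega]
      exact hM
    -- nothing below p0 does
    have hmin : ∀ q, 1 ≤ q → q < p0 → solChk d' L q = false := by
      intro q h1 h2
      by_contra hne
      have hq : solChk d' L q = true := by
        cases hqe : solChk d' L q
        · exact absurd hqe hne
        · rfl
      rw [solChk_iff n d' L q hd] at hq
      rw [← brd_iff_per n.toNat q hmpos h1 (by rw [← hs, ← hLdef]; omega)] at hq
      have := le_maxBrd s L (L - q) hq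
      omega
    -- A's find? returns p0 iff it is in range
    have hfind := find?_range'_aux (fun p => solChk d' L p) p0 hfp0 (L / 2) 1
      hp0pos hmin
    -- B's failure table value
    obtain ⟨_, hpi, _⟩ := kmpFold s hLpos (L - 1) (by omega)
    have hpiL : ((List.range' 1 (L - 1)).foldl (kmpStep s)
        (List.replicate L 0, 0)).1.getD (L - 1) 0 = M := by
      have := hpi (L - 1) (le_refl _)
      rw [show L - 1 + 1 = L by omega] at this
      rw [← hLdef] at this
      exact this
    -- evaluate both sides
    unfold solution solution_alt
    rw [hrun, if_neg (by omega : ¬ n ≤ 0)]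
    simp only [Nat.zero_add, ← hLbl, ← hs, ← hLdef, hfind, hpiL, ← hp0def]
    by_cases hhalf : p0 ≤ L / 2
    · rw [if_pos (by omega : p0 < 1 + L / 2), if_pos hhalf]
    · rw [if_neg (by omega : ¬ p0 < 1 + L / 2), if_neg hhalf]
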